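-- pv_equiv track=rewrite | github.com/ShaikNagurShareef/Hacklytics-2026 | MEDORA/backend/app/agents/orchestrator.py | _route_by_keywords
-- ===== SOURCE A (Python) =====
-- from typing import Any, Dict, List, Optional
--
-- AGENT_KEYWORDS: Dict[str, List[str]] = {
--     "DietaryAgent": [
--         "diet", "meal plan", "calorie", "calories", "nutrition",
--         "macro", "protein", "carbs", "fat", "fats", "fibre", "fiber",
--         "bmr", "tdee", "eat", "food", "vegetarian", "vegan",
--         "keto", "allergy", "allergies", "intolerant", "intolerance",
--         "breakfast", "lunch", "dinner", "snack", "recipe",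
--         "weight loss", "weight gain", "nutritional", "healthy eating",
--     ],
--     "VirtualDoctorAgent": [
--         "symptom", "symptoms", "pain", "ache", "fever", "cough",
--         "doctor", "medical", "medicine", "diagnosis", "emergency",
--         "hospital", "clinic", "first aid", "cpr", "choking",
--         "bleeding", "seizure", "heart attack", "stroke", "injury",
--         "rash", "infection", "vomiting", "nausea", "dizziness",
--         "headache", "blood pressure", "diabetes", "asthma",
--         "breathing", "health advice", "health concern",
--         "prescription", "check-up", "triage",
--     ],
-- }
--
-- def _route_by_keywords(query: str) -> Optional[str]:
--     """
--     Score each agent by how many domain keywords appear in the query.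
--     Returns the agent name with the highest score, or None if tied / 0.
--     """
--     q = query.lower()
--     scores: Dict[str, int] = {}
--
--     for agent_name, keywords in AGENT_KEYWORDS.items():
--         score = sum(1 for kw in keywords if kw in q)
--         if score > 0:
--             scores[agent_name] = score
--
--     if not scores:
--         return None
--
--     # Return highest-scoring agent; if tied, return None → fall through to LLM
--     sorted_agents = sorted(scores.items(), key=lambda x: x[1], reverse=True)
--     if len(sorted_agents) >= 2 and sorted_agents[0][1] == sorted_agents[1][1]:
--         return None  # ambiguous — let LLM decide
--     return sorted_agents[0][0]
-- ===== SOURCE B (Python) =====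
-- from typing import Dict, List, Optional
--
-- AGENT_KEYWORDS: Dict[str, List[str]] = {
--     "DietaryAgent": [
--         "diet", "meal plan", "calorie", "calories", "nutrition",
--         "macro", "protein", "carbs", "fat", "fats", "fibre", "fiber",
--         "bmr", "tdee", "eat", "food", "vegetarian", "vegan",
--         "keto", "allergy", "allergies", "intolerant", "intolerance",
--         "breakfast", "lunch", "dinner", "snack", "recipe",
--         "weight loss", "weight gain", "nutritional", "healthy eating",
--     ],
--     "VirtualDoctorAgent": [
--         "symptom", "symptoms", "pain", "ache", "fever", "cough",
--         "doctor", "medical", "medicine", "diagnosis", "emergency",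
--         "hospital", "clinic", "first aid", "cpr", "choking",
--         "bleeding", "seizure", "heart attack", "stroke", "injury",
--         "rash", "infection", "vomiting", "nausea", "dizziness",
--         "headache", "blood pressure", "diabetes", "asthma",
--         "breathing", "health advice", "health concern",
--         "prescription", "check-up", "triage",
--     ],
-- }
--
-- def _route_by_keywords(query: str) -> Optional[str]:
--     """There are exactly two agents, so compare their hit counts directly:
--     the strictly higher one wins; equal counts (including 0-0) mean None."""
--     q = query.lower()
--     d = len([kw for kw in AGENT_KEYWORDS["DietaryAgent"] if kw in q])
--     v = len([kw for kw in AGENT_KEYWORDS["VirtualDoctorAgent"] if kw in q])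
--     if d > v:
--         return "DietaryAgent"
--     if v > d:
--         return "VirtualDoctorAgent"
--     return None
-- ===== Notes on version B (the rewrite author's own statement) =====
-- stated objective: simpler
-- what changed: Replaces the generic score-dict plus descending sort and top-two tie check with a direct comparison of the two fixed agents' keyword hit counts (strictly larger wins, equal means None), exploiting that AGENT_KEYWORDS has exactly two entries.
import Mathlib
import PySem

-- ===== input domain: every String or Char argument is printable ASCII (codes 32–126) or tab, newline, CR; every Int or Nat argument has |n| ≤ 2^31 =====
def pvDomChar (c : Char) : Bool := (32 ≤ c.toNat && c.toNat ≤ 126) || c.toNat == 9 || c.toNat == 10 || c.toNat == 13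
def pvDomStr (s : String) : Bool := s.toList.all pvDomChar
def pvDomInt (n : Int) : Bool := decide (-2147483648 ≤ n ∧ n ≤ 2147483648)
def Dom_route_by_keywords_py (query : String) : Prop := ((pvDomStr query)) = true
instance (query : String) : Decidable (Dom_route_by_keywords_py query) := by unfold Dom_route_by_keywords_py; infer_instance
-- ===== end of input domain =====

-- B drops A's score-dict, descending sort and top-two tie check: with exactly two agents it
-- compares their hit counts directly (strictly larger wins, equal means None). Objective: simpler.

-- module constant AGENT_KEYWORDS (dict in insertion order), shared data for both ports
def pvAgentKeywords : List (String × List String) :=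
  [("DietaryAgent",
    ["diet", "meal plan", "calorie", "calories", "nutrition",
     "macro", "protein", "carbs", "fat", "fats", "fibre", "fiber",
     "bmr", "tdee", "eat", "food", "vegetarian", "vegan",
     "keto", "allergy", "allergies", "intolerant", "intolerance",
     "breakfast", "lunch", "dinner", "snack", "recipe",
     "weight loss", "weight gain", "nutritional", "healthy eating"]),
   ("VirtualDoctorAgent",
    ["symptom", "symptoms", "pain", "ache", "fever", "cough",
     "doctor", "medical", "medicine", "diagnosis", "emergency",
     "hospital", "clinic", "first aid", "cpr", "choking",
     "bleeding", "seizure", "heart attack", "stroke", "injury",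
     "rash", "infection", "vomiting", "nausea", "dizziness",
     "headache", "blood pressure", "diabetes", "asthma",
     "breathing", "health advice", "health concern",
     "prescription", "check-up", "triage"])]

-- ===== PORT A =====
-- A's score of one agent: sum(1 for kw in keywords if kw in q)
def pvHits (q : String) (kws : List String) : Int :=
  kws.foldl (fun acc kw => if PySem.Str.isIn kw q then acc + 1 else acc) 0

def route_by_keywords_py (query : String) : Option String :=
  let q := PySem.Str.lower query
  let scores : PySem.Dict String Int :=
    pvAgentKeywords.foldl
      (fun scores p =>
        let score := pvHits q p.2
        if score > 0 then scores.insert p.1 score else scores)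
      PySem.Dict.empty
  if scores.items = [] then none
  else
    let sorted_agents := PySem.List.sorted scores.items (fun x => x.2) true
    match sorted_agents with
    | a :: b :: _ => if a.2 == b.2 then none else some a.1
    | [a] => some a.1
    | [] => none

-- ===== PORT B =====
-- B's score of one agent: len([kw for kw in keywords if kw in q])
def pvCount (q : String) (kws : List String) : Int :=
  ((kws.filter (fun kw => PySem.Str.isIn kw q)).length : Int)

def route_by_keywords_py_alt (query : String) : Option String :=
  let q := PySem.Str.lower query
  let d := pvCount q ((pvAgentKeywords.lookup "DietaryAgent").getD [])
  let v := pvCount q ((pvAgentKeywords.lookup "VirtualDoctorAgent").getD [])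
  if d > v then some "DietaryAgent"
  else if v > d then some "VirtualDoctorAgent"
  else none

-- ===== PRECONDITION & SPEC =====
def Spec_route_by_keywords_py (query : String) (out : Option String) : Prop := out = route_by_keywords_py_alt query
instance (query : String) (out : Option String) : Decidable (Spec_route_by_keywords_py query out) := by unfold Spec_route_by_keywords_py; infer_instance

-- ===== CLAIM (what is proved, stated in full; the proofs are below) =====
def Claim_equal_route_by_keywords_py : Prop := ∀ (query : String), Dom_route_by_keywords_py query → Spec_route_by_keywords_py query (route_by_keywords_py query)

-- ===== LEMMAS AND PROOFS =====

-- the two scoring helpers agree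
lemma pvHits_eq_pvCount (q : String) (kws : List String) : pvHits q kws = pvCount q kws := by
  unfold pvHits pvCount
  suffices h : ∀ (l : List String) (acc : Int),
      l.foldl (fun acc kw => if PySem.Str.isIn kw q then acc + 1 else acc) acc
        = acc + ((l.filter (fun kw => PySem.Str.isIn kw q)).length : Int) by
    simpa using h kws 0
  intro l
  induction l with
  | nil => intro acc; simp
  | cons x xs ih =>
    intro acc
    rw [List.foldl_cons, List.filter_cons]
    by_cases hx : PySem.Str.isIn x q
    · rw [if_pos hx, if_pos hx, ih]
      simp only [List.length_cons]
      push_cast; ring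
    · rw [if_neg hx, if_neg hx, ih]

lemma pvCount_nonneg (q : String) (kws : List String) : 0 ≤ pvCount q kws := by
  unfold pvCount; positivity

-- A's tail computation as a function of the two agents' scores
def pvAfin (s1 s2 : Int) : Option String :=
  let scores : PySem.Dict String Int :=
    (if s1 > 0 then (PySem.Dict.empty : PySem.Dict String Int).insert "DietaryAgent" s1
     else PySem.Dict.empty)
  let scores := if s2 > 0 then scores.insert "VirtualDoctorAgent" s2 else scores
  if scores.items = [] then none
  else
    let sorted_agents := PySem.List.sorted scores.items (fun x => x.2) true
    match sorted_agents with
    | a :: b :: _ => if a.2 == b.2 then none else some a.1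
    | [a] => some a.1
    | [] => none

-- B's tail computation as a function of the two agents' scores
def pvBfin (s1 s2 : Int) : Option String :=
  if s1 > s2 then some "DietaryAgent"
  else if s2 > s1 then some "VirtualDoctorAgent"
  else none

lemma pvA_eq (query : String) :
    route_by_keywords_py query =
      pvAfin (pvHits (PySem.Str.lower query) pvAgentKeywords[0].2)
             (pvHits (PySem.Str.lower query) pvAgentKeywords[1].2) := rfl

lemma pvB_eq (query : String) :
    route_by_keywords_py_alt query =
      pvBfin (pvCount (PySem.Str.lower query) pvAgentKeywords[0].2)
             (pvCount (PySem.Str.lower query) pvAgentKeywords[1].2) := rfl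

lemma pv_items2 (s1 s2 : Int) :
    ((PySem.Dict.empty.insert "DietaryAgent" s1).insert "VirtualDoctorAgent" s2).items
      = [("DietaryAgent", s1), ("VirtualDoctorAgent", s2)] := by
  rw [PySem.Dict.items_insert_of_not_contains, PySem.Dict.items_insert_of_not_contains]
  · rfl
  · rfl
  · rw [PySem.Dict.contains_insert, PySem.Dict.contains_empty]; rfl

lemma pv_items1 (n : String) (s : Int) :
    (PySem.Dict.empty.insert n s).items = [(n, s)] := by
  rw [PySem.Dict.items_insert_of_not_contains] <;> rfl

lemma pv_sorted_keep (s1 s2 : Int) (h : s2 ≤ s1) :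
    PySem.List.sorted [("DietaryAgent", s1), ("VirtualDoctorAgent", s2)] (fun x => x.2) true
      = [("DietaryAgent", s1), ("VirtualDoctorAgent", s2)] := by
  apply PySem.List.sorted_rev_eq_self_of_pairwise
  simp [h]

lemma pv_sorted_swap (s1 s2 : Int) (h : s1 < s2) :
    PySem.List.sorted [("DietaryAgent", s1), ("VirtualDoctorAgent", s2)] (fun x => x.2) true
      = [("VirtualDoctorAgent", s2), ("DietaryAgent", s1)] := by
  apply PySem.List.sorted_rev_eq_of_perm_of_pairwise_gt
  · exact List.Perm.swap _ _ _
  · simp [h]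

lemma pv_core (s1 s2 : Int) (h1 : 0 ≤ s1) (h2 : 0 ≤ s2) : pvAfin s1 s2 = pvBfin s1 s2 := by
  by_cases p1 : s1 > 0 <;> by_cases p2 : s2 > 0 <;>
    simp only [pvAfin, pvBfin, p1, p2, if_true, if_false]
  · -- both positive
    rw [pv_items2]
    have hne : ¬([("DietaryAgent", s1), ("VirtualDoctorAgent", s2)] = ([] : List (String × Int))) := by simp
    rw [if_neg hne]
    rcases lt_trichotomy s1 s2 with hlt | heq | hgt
    · rw [pv_sorted_swap s1 s2 hlt]
      have hne2 : ¬ (s2 == s1) = true := by simp; omega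
      simp [hlt, not_lt.mpr (le_of_lt hlt), hne2]
    · subst heq
      rw [pv_sorted_keep s1 s1 le_rfl]
      simp
    · rw [pv_sorted_keep s1 s2 (le_of_lt hgt)]
      have hne2 : ¬ (s1 == s2) = true := by simp; omega
      simp [hgt, hne2]
  · -- only s1 positive
    have hz : s2 = 0 := le_antisymm (not_lt.mp p2) h2
    rw [pv_items1]
    have hne : ¬([("DietaryAgent", s1)] = ([] : List (String × Int))) := by simp
    rw [if_neg hne]
    simp [PySem.List.sorted, PySem.List.insertBy, hz, p1]
  · -- only s2 positive
    have hz : s1 = 0 := le_antisymm (not_lt.mp p1) h1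
    rw [pv_items1]
    have hne : ¬([("VirtualDoctorAgent", s2)] = ([] : List (String × Int))) := by simp
    rw [if_neg hne]
    simp [PySem.List.sorted, PySem.List.insertBy, hz, p2, h2]
  · -- neither
    have z1 : s1 = 0 := le_antisymm (not_lt.mp p1) h1
    have z2 : s2 = 0 := le_antisymm (not_lt.mp p2) h2
    have he : (PySem.Dict.empty : PySem.Dict String Int).items = [] := rfl
    simp [z1, z2, he]

-- ===== VERDICT (by name: the statement is the Claim_ definition above) =====
theorem route_by_keywords_py_spec : Claim_equal_route_by_keywords_py := by
  intro query _
  unfold Spec_route_by_keywords_py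
  rw [pvA_eq, pvB_eq, pvHits_eq_pvCount, pvHits_eq_pvCount,
      pv_core _ _ (pvCount_nonneg _ _) (pvCount_nonneg _ _)]
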